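-- pv_equiv track=rewrite | github.com/andrew-quintana/insurance_navigator | tests/phase_c_test_runner.py | _calculate_suite_summary
-- ===== SOURCE A (Python) =====
-- from typing import Dict, List, Any
--
-- def _calculate_suite_summary(test_results: List[Dict[str, Any]]) -> Dict[str, Any]:
--     """Calculate summary for a test suite."""
--     total_tests = sum(result.get("summary", {}).get("total_tests", 0) for result in test_results)
--     passed_tests = sum(result.get("summary", {}).get("passed", 0) for result in test_results)
--     failed_tests = sum(result.get("summary", {}).get("failed", 0) for result in test_results)
--     critical_failures = sum(result.get("summary", {}).get("critical_failures", 0) for result in test_results)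
--
--     return {
--         "total_tests": total_tests,
--         "passed": passed_tests,
--         "failed": failed_tests,
--         "critical_failures": critical_failures
--     }
-- ===== SOURCE B (Python) =====
-- from typing import Dict, List, Any
--
-- def _calculate_suite_summary(test_results: List[Dict[str, Any]]) -> Dict[str, Any]:
--     """Calculate summary for a test suite (single pass)."""
--     total_tests = passed_tests = failed_tests = critical_failures = 0
--     for result in test_results:
--         summary = result.get("summary", {})
--         total_tests += summary.get("total_tests", 0)
--         passed_tests += summary.get("passed", 0)
--         failed_tests += summary.get("failed", 0)
--         critical_failures += summary.get("critical_failures", 0)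
--     return {
--         "total_tests": total_tests,
--         "passed": passed_tests,
--         "failed": failed_tests,
--         "critical_failures": critical_failures
--     }
-- ===== Notes on version B (the rewrite author's own statement) =====
-- stated objective: simpler
-- what changed: Replaces four separate sum-generator passes (each re-fetching the nested summary dict per element) with one loop over test_results that fetches summary once and updates four accumulators.
import Mathlib
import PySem

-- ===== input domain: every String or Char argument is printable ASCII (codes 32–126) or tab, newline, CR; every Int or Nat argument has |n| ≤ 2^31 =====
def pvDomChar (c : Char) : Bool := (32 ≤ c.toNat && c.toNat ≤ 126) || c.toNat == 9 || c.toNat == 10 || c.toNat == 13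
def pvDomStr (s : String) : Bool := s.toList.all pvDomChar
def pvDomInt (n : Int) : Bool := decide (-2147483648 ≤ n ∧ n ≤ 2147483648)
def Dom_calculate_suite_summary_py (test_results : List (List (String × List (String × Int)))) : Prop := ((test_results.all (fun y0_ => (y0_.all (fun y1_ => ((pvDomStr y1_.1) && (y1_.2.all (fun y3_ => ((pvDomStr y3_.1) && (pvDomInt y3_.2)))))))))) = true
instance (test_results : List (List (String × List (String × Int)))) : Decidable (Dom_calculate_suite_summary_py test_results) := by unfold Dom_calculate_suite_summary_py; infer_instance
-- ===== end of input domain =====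

-- B replaces A's four separate summation passes with a single loop keeping four accumulators; same result, simpler single pass.


-- shared primitive: Python dict.get(k, default) on an association list (first match)
def pvGetD {α : Type} (xs : List (String × α)) (k : String) (dflt : α) : α :=
  match xs.find? (fun p => p.1 == k) with
  | some p => p.2
  | none => dflt

-- ===== PORT A =====
-- four independent sum-comprehensions, each re-fetching the "summary" dict
def calculate_suite_summary_py (test_results : List (List (String × List (String × Int)))) : List (String × Int) :=
  let total_tests := (test_results.map (fun r => pvGetD (pvGetD r "summary" []) "total_tests" 0)).sum
  let passed_tests := (test_results.map (fun r => pvGetD (pvGetD r "summary" []) "passed" 0)).sum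
  let failed_tests := (test_results.map (fun r => pvGetD (pvGetD r "summary" []) "failed" 0)).sum
  let critical_failures := (test_results.map (fun r => pvGetD (pvGetD r "summary" []) "critical_failures" 0)).sum
  [("total_tests", total_tests), ("passed", passed_tests), ("failed", failed_tests), ("critical_failures", critical_failures)]

-- ===== PORT B =====
-- one pass maintaining four accumulators; "summary" is fetched once per element
def calculate_suite_summary_py_alt (test_results : List (List (String × List (String × Int)))) : List (String × Int) :=
  let acc := test_results.foldl
    (fun (acc : Int × Int × Int × Int) r =>
      let s := pvGetD r "summary" []
      (acc.1 + pvGetD s "total_tests" 0,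
       acc.2.1 + pvGetD s "passed" 0,
       acc.2.2.1 + pvGetD s "failed" 0,
       acc.2.2.2 + pvGetD s "critical_failures" 0))
    (0, 0, 0, 0)
  [("total_tests", acc.1), ("passed", acc.2.1), ("failed", acc.2.2.1), ("critical_failures", acc.2.2.2)]

-- ===== PRECONDITION & SPEC =====
def Spec_calculate_suite_summary_py (test_results : List (List (String × List (String × Int)))) (out : List (String × Int)) : Prop := out = calculate_suite_summary_py_alt test_results
instance (test_results : List (List (String × List (String × Int)))) (out : List (String × Int)) : Decidable (Spec_calculate_suite_summary_py test_results out) := by unfold Spec_calculate_suite_summary_py; infer_instance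

-- ===== CLAIM (what is proved, stated in full; the proofs are below) =====
def Claim_equal_calculate_suite_summary_py : Prop := ∀ (test_results : List (List (String × List (String × Int)))), Dom_calculate_suite_summary_py test_results → Spec_calculate_suite_summary_py test_results (calculate_suite_summary_py test_results)

-- ===== LEMMAS AND PROOFS =====

-- the single-pass fold computes the four sums at once
theorem pv_fold_eq_sums (trs : List (List (String × List (String × Int)))) (a b c d : Int) :
    trs.foldl
      (fun (acc : Int × Int × Int × Int) r =>
        let s := pvGetD r "summary" []
        (acc.1 + pvGetD s "total_tests" 0,
         acc.2.1 + pvGetD s "passed" 0,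
         acc.2.2.1 + pvGetD s "failed" 0,
         acc.2.2.2 + pvGetD s "critical_failures" 0))
      (a, b, c, d)
    = (a + (trs.map (fun r => pvGetD (pvGetD r "summary" []) "total_tests" 0)).sum,
       b + (trs.map (fun r => pvGetD (pvGetD r "summary" []) "passed" 0)).sum,
       c + (trs.map (fun r => pvGetD (pvGetD r "summary" []) "failed" 0)).sum,
       d + (trs.map (fun r => pvGetD (pvGetD r "summary" []) "critical_failures" 0)).sum) := by
  induction trs generalizing a b c d with
  | nil => simp
  | cons r rest ih =>
    simp only [List.foldl_cons, List.map_cons, List.sum_cons, ih]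
    refine Prod.ext ?_ (Prod.ext ?_ (Prod.ext ?_ ?_)) <;> simp <;> ring

-- ===== VERDICT (by name: the statement is the Claim_ definition above) =====
theorem calculate_suite_summary_py_spec : Claim_equal_calculate_suite_summary_py := by
  intro trs _
  unfold Spec_calculate_suite_summary_py calculate_suite_summary_py calculate_suite_summary_py_alt
  simp [pv_fold_eq_sums]
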